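-- pv_equiv track=rewrite | github.com/youngdanon/InfoLessons2021-2 | 1course/test/t2.py | no_dup
-- ===== SOURCE A (Python) =====
-- def get_key(d, value):
--     for k, v in d.items():
--         if v == value:
--             return k
--
-- def no_dup(dict):
--     res_dict = {}
--     no_dup_lst = list(set(dict.values()))
--     v = list(dict.values())
--     for i in range(len(v)):
--         if v[i] in no_dup_lst:
--             res_dict.update({get_key(dict, v[i]): v[i]})
--     return res_dict
-- ===== SOURCE B (Python) =====
-- def no_dup(dict):
--     res = {}
--     seen = set()
--     for k, v in dict.items():
--         if v not in seen:
--             seen.add(v)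
--             res[k] = v
--     return res
-- ===== Notes on version B (the rewrite author's own statement) =====
-- stated objective: faster
-- what changed: replaces the per-element linear scans (get_key over the whole dict and membership in a list of distinct values) by a single pass that records each value's first key using a seen-set
import Mathlib
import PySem

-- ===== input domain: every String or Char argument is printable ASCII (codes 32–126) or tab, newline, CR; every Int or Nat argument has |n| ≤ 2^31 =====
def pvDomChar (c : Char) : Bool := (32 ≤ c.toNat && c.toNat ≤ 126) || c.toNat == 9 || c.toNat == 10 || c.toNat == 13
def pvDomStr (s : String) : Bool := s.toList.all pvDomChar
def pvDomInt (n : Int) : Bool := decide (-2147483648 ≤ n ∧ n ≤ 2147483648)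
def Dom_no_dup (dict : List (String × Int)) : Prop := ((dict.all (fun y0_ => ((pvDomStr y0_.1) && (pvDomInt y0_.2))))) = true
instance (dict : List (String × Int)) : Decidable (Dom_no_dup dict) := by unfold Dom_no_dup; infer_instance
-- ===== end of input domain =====

-- B replaces A's quadratic per-element scans by one pass with a seen-set; equivalence is proved on duplicate-free key lists (the lists that represent a Python dict).


-- ===== PORT A =====
-- get_key: first key whose value equals `value`; Python's implicit `return None` is `none`.
def get_key (d : List (String × Int)) (value : Int) : Option String :=
  match d with
  | [] => none
  | (k, v) :: rest => if v == value then some k else get_key rest value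

-- Literal port of A. `no_dup_lst = list(set(dict.values()))` is consumed only by membership,
-- so it is kept as the PySem.Set (iteration order of the Python set is never observed).
-- The `none` branches (index out of range / get_key finding nothing) are unreachable in A's loop.
def no_dup (dict : List (String × Int)) : List (String × Int) :=
  let v := dict.map (fun p => p.2)
  let no_dup_lst : PySem.Set Int := PySem.Set.ofList v
  let res_dict :=
    (PySem.List.pyRange 0 (v.length : Int) 1).foldl
      (fun res i =>
        match PySem.List.pyGet? v i with
        | some vi =>
          if PySem.Set.contains no_dup_lst vi then
            match get_key dict vi with
            | some k => res.insert k vi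
            | none => res
          else res
        | none => res)
      (PySem.Dict.empty : PySem.Dict String Int)
  res_dict.items

-- ===== PORT B =====
-- One pass: res gets (k, v) at the first occurrence of each value; seen is the set of values met.
def no_dup_alt (dict : List (String × Int)) : List (String × Int) :=
  (dict.foldl
    (fun (st : PySem.Dict String Int × PySem.Set Int) kv =>
      if PySem.Set.contains st.2 kv.2 then st
      else (st.1.insert kv.1 kv.2, PySem.Set.add st.2 kv.2))
    (PySem.Dict.empty, PySem.Set.empty)).1.items

-- ===== PRECONDITION & SPEC =====
-- Pre_ excludes lists with duplicate keys: they do not represent a Python dict (dict construction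
-- collapses duplicate keys), so A never receives such an input; on them the two folds may disagree.
def Pre_no_dup (dict : List (String × Int)) : Prop := (dict.map (fun p => p.1)).Nodup
instance (dict : List (String × Int)) : Decidable (Pre_no_dup dict) := by unfold Pre_no_dup; infer_instance
def pvWitness_no_dup : (List (String × Int)) := [("a", 1), ("b", 2), ("c", 1)]
def Spec_no_dup (dict : List (String × Int)) (out : List (String × Int)) : Prop := out = no_dup_alt dict
instance (dict : List (String × Int)) (out : List (String × Int)) : Decidable (Spec_no_dup dict out) := by unfold Spec_no_dup; infer_instance

-- ===== CLAIM (what is proved, stated in full; the proofs are below) =====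
def Claim_equal_no_dup : Prop := ∀ (dict : List (String × Int)), Dom_no_dup dict → Pre_no_dup dict → Spec_no_dup dict (no_dup dict)

-- ===== LEMMAS AND PROOFS =====

theorem gk_mem_keys {d : List (String × Int)} {v : Int} {k : String}
    (h : get_key d v = some k) : k ∈ d.map (fun p => p.1) := by
  induction d with
  | nil => simp [get_key] at h
  | cons p rest ih =>
    obtain ⟨k', v'⟩ := p
    simp only [get_key] at h
    by_cases hv : v' == v
    · simp [hv] at h; simp [h]
    · simp [hv] at h; simp [ih h]

theorem gk_isSome_of_mem {d : List (String × Int)} {v : Int}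
    (h : v ∈ d.map (fun p => p.2)) : ∃ k, get_key d v = some k := by
  induction d with
  | nil => simp at h
  | cons p rest ih =>
    obtain ⟨k', v'⟩ := p
    by_cases hv : v' = v
    · exact ⟨k', by simp [get_key, hv]⟩
    · have h' : v ∈ rest.map (fun p => p.2) := by
        rcases List.mem_map.mp h with ⟨q, hq, hq2⟩
        rcases List.mem_cons.mp hq with rfl | hq'
        · exact absurd hq2 hv
        · exact List.mem_map.mpr ⟨q, hq', hq2⟩
      obtain ⟨k, hk⟩ := ih h'
      exact ⟨k, by simp [get_key, hv, hk]⟩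

theorem gk_append_left {d e : List (String × Int)} {v : Int} {k : String}
    (h : get_key d v = some k) : get_key (d ++ e) v = some k := by
  induction d with
  | nil => simp [get_key] at h
  | cons p rest ih =>
    obtain ⟨k', v'⟩ := p
    simp only [List.cons_append, get_key] at h ⊢
    by_cases hv : v' == v
    · simpa [hv] using h
    · simp only [hv] at h ⊢
      simp at hv
      simp at h ⊢
      exact ih h

theorem gk_append_fresh {d : List (String × Int)} {v : Int} {k0 : String}
    (h : v ∉ d.map (fun p => p.2)) : get_key (d ++ [(k0, v)]) v = some k0 := by
  induction d with
  | nil => simp [get_key]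
  | cons p rest ih =>
    obtain ⟨k', v'⟩ := p
    have h1 : v' ≠ v := fun hv => h (List.mem_map.mpr ⟨(k', v'), List.mem_cons_self, hv⟩)
    have h2 : v ∉ rest.map (fun p => p.2) := fun hv => h (by simpa using Or.inr (List.mem_map.mp hv))
    have := ih h2
    simp only [List.cons_append, get_key]
    simp [h1, this]

-- insert of an already-present binding is the identity (on Nodup keys)
theorem insert_eq_self {d : PySem.Dict String Int} {k : String} {v : Int}
    (hnd : d.keys.Nodup) (h : d.get? k = some v) : d.insert k v = d := by
  have hc : d.contains k = true := by rw [PySem.Dict.contains_eq_isSome_get?, h]; rfl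
  have hm : (k, v) ∈ d.items := (PySem.Dict.get?_eq_some_iff_mem_items d k v hnd).mp h
  apply PySem.Dict.ext
  rw [PySem.Dict.items_insert_of_contains d v hc]
  conv_rhs => rw [← List.map_id d.items]
  apply List.map_congr_left
  intro p hp
  by_cases hpk : p.1 = k
  · have : p = (k, v) := List.inj_on_of_nodup_map hnd hp hm hpk
    simp [this]
  · simp [hpk]

-- a fold over range-indices reading l[i]? is a fold over l
theorem foldl_range_get? {α β : Type} (l : List α) (f : β → α → β) (init : β) :
    (List.range l.length).foldl
      (fun acc i => match l[i]? with | some x => f acc x | none => acc) init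
    = l.foldl f init := by
  induction l using List.reverseRecOn generalizing init with
  | nil => simp
  | append_singleton l x ih =>
    have hcong : (List.range l.length).foldl
        (fun acc i => match (l ++ [x])[i]? with | some x => f acc x | none => acc) init
        = (List.range l.length).foldl
        (fun acc i => match l[i]? with | some x => f acc x | none => acc) init := by
      apply PySem.List.foldl_congr_mem
      intro acc i hi
      rw [List.getElem?_append_left (List.mem_range.mp hi)]
    rw [List.length_append, List.length_singleton, List.range_succ, List.foldl_append,
      List.foldl_append, hcong, ih]
    simp

-- the step function of A after the loop is rewritten over the pair list
def astep (full : List (String × Int)) (res : PySem.Dict String Int) (p : String × Int) :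
    PySem.Dict String Int :=
  match get_key full p.2 with
  | some k => res.insert k p.2
  | none => res

def bstep (st : PySem.Dict String Int × PySem.Set Int) (kv : String × Int) :
    PySem.Dict String Int × PySem.Set Int :=
  if PySem.Set.contains st.2 kv.2 then st
  else (st.1.insert kv.1 kv.2, PySem.Set.add st.2 kv.2)

-- main invariant, by induction from the right
theorem main_inv (d : List (String × Int)) (hk : (d.map (fun p => p.1)).Nodup) :
    d.foldl (astep d) PySem.Dict.empty = (d.foldl bstep (PySem.Dict.empty, PySem.Set.empty)).1
    ∧ (d.foldl bstep (PySem.Dict.empty, PySem.Set.empty)).2 = PySem.Set.ofList (d.map (fun p => p.2))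
    ∧ (∀ p ∈ d, ∃ k, get_key d p.2 = some k ∧ (d.foldl bstep (PySem.Dict.empty, PySem.Set.empty)).1.get? k = some p.2)
    ∧ (d.foldl bstep (PySem.Dict.empty, PySem.Set.empty)).1.keys.Nodup := by
  induction d using List.reverseRecOn with
  | nil =>
    refine ⟨rfl, rfl, by simp, by simp [PySem.Dict.keys_empty]⟩
  | append_singleton d' x ih =>
    obtain ⟨k0, v0⟩ := x
    rw [List.map_append] at hk
    have hk1 : (d'.map (fun p => p.1)).Nodup := (List.nodup_append.mp hk).1
    have hk2 : k0 ∉ d'.map (fun p => p.1) := fun hm =>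
      (List.nodup_append.mp hk).2.2 k0 hm k0 (by simp) rfl
    obtain ⟨h1, h2, h3, h4⟩ := ih hk1
    have hvals : ((d' ++ [(k0, v0)]).map (fun p => p.2))
        = d'.map (fun p => p.2) ++ [v0] := by simp
    have hpre : List.foldl (astep (d' ++ [(k0, v0)])) PySem.Dict.empty d'
        = List.foldl (astep d') PySem.Dict.empty d' := by
      apply PySem.List.foldl_congr_mem
      intro acc p hp
      obtain ⟨k, hgk⟩ := gk_isSome_of_mem (List.mem_map.mpr ⟨p, hp, rfl⟩)
      simp only [astep, hgk, gk_append_left hgk]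
    by_cases hv : v0 ∈ d'.map (fun p => p.2)
    · -- value already seen: both sides leave the dict unchanged
      obtain ⟨p, hp, hp2⟩ := List.mem_map.mp hv
      obtain ⟨k, hgk, hget⟩ := h3 p hp
      rw [hp2] at hgk hget
      have hc : PySem.Set.contains (List.foldl bstep (PySem.Dict.empty, PySem.Set.empty) d').2 v0 = true := by
        rw [PySem.Set.contains_iff, h2, PySem.Set.mem_ofList]; exact hv
      have hB : List.foldl bstep (PySem.Dict.empty, PySem.Set.empty) (d' ++ [(k0, v0)])
          = List.foldl bstep (PySem.Dict.empty, PySem.Set.empty) d' := by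
        rw [List.foldl_append]
        simp only [List.foldl_cons, List.foldl_nil, bstep]
        rw [hc]
        simp only [if_true]
      refine ⟨?_, ?_, ?_, ?_⟩
      · rw [List.foldl_append, hpre, h1, hB]
        simp only [List.foldl_cons, List.foldl_nil, astep, gk_append_left hgk]
        exact insert_eq_self h4 hget
      · rw [hB, h2, hvals, PySem.Set.ofList_append_singleton]
        exact (PySem.Set.add_of_mem ((PySem.Set.mem_ofList _ _).mpr hv)).symm
      · intro q hq
        rw [hB]
        rcases List.mem_append.mp hq with hq' | hq'
        · obtain ⟨k', hgk', hget'⟩ := h3 q hq'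
          exact ⟨k', gk_append_left hgk', hget'⟩
        · simp at hq'
          subst hq'
          exact ⟨k, gk_append_left hgk, hget⟩
      · rw [hB]; exact h4
    · -- fresh value: both sides insert (k0, v0)
      have hfresh := gk_append_fresh (d := d') (k0 := k0) hv
      have hc : PySem.Set.contains (List.foldl bstep (PySem.Dict.empty, PySem.Set.empty) d').2 v0 = false := by
        rw [← Bool.not_eq_true, PySem.Set.contains_iff, h2, PySem.Set.mem_ofList]
        exact hv
      have hB : List.foldl bstep (PySem.Dict.empty, PySem.Set.empty) (d' ++ [(k0, v0)])
          = ((List.foldl bstep (PySem.Dict.empty, PySem.Set.empty) d').1.insert k0 v0,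
             PySem.Set.add (List.foldl bstep (PySem.Dict.empty, PySem.Set.empty) d').2 v0) := by
        rw [List.foldl_append]
        simp only [List.foldl_cons, List.foldl_nil, bstep]
        rw [hc]
        simp only [Bool.false_eq_true, if_false]
      refine ⟨?_, ?_, ?_, ?_⟩
      · rw [List.foldl_append, hpre, h1, hB]
        simp only [List.foldl_cons, List.foldl_nil, astep, hfresh]
      · rw [hB, h2, hvals, PySem.Set.ofList_append_singleton]
      · intro q hq
        rw [hB]
        rcases List.mem_append.mp hq with hq' | hq'
        · obtain ⟨k', hgk', hget'⟩ := h3 q hq'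
          have hk0 : k' ≠ k0 := by
            intro hkk
            exact hk2 (hkk ▸ gk_mem_keys hgk')
          exact ⟨k', gk_append_left hgk', by rw [PySem.Dict.get?_insert_of_ne _ _ hk0]; exact hget'⟩
        · simp at hq'
          subst hq'
          exact ⟨k0, hfresh, PySem.Dict.get?_insert_self _ _ _⟩
      · rw [hB]
        exact PySem.Dict.nodup_keys_insert _ _ _ h4

-- A's index loop over pyRange equals the fold of astep over the pair list
theorem a_as_fold (dict : List (String × Int)) :
    no_dup dict = (dict.foldl (astep dict) PySem.Dict.empty).items := by
  unfold no_dup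
  simp only []
  rw [PySem.List.pyRange_zero_natCast, List.foldl_map]
  have step1 : ∀ (init : PySem.Dict String Int),
      (List.range (dict.map (fun p => p.2)).length).foldl
        (fun acc k =>
          match PySem.List.pyGet? (dict.map (fun p => p.2)) ((k : Nat) : Int) with
          | some vi =>
            if PySem.Set.contains (PySem.Set.ofList (dict.map (fun p => p.2))) vi then
              match get_key dict vi with
              | some k => acc.insert k vi
              | none => acc
            else acc
          | none => acc) init
      = (dict.map (fun p => p.2)).foldl
        (fun acc vi =>
          match get_key dict vi with
          | some k => acc.insert k vi
          | none => acc) init := by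
    intro init
    rw [← foldl_range_get? (dict.map (fun p => p.2))
      (fun acc vi =>
        match get_key dict vi with
        | some k => acc.insert k vi
        | none => acc) init]
    apply PySem.List.foldl_congr_mem
    intro acc i hi
    have hi' : i < (dict.map (fun p => p.2)).length := List.mem_range.mp hi
    rw [PySem.List.pyGet?_natCast, List.getElem?_eq_getElem hi']
    have hmem : (dict.map (fun p => p.2))[i] ∈ dict.map (fun p => p.2) := List.getElem_mem hi'
    have hc : PySem.Set.contains (PySem.Set.ofList (dict.map (fun p => p.2)))
        ((dict.map (fun p => p.2))[i]) = true := by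
      rw [PySem.Set.contains_iff, PySem.Set.mem_ofList]; exact hmem
    simp only []
    rw [hc]
    simp only [if_true]
  rw [step1, List.foldl_map]
  rfl

-- ===== VERDICT (by name: the statement is the Claim_ definition above) =====
theorem no_dup_spec : Claim_equal_no_dup := by
  intro dict _ hpre
  unfold Spec_no_dup no_dup_alt
  rw [a_as_fold dict, (main_inv dict hpre).1]
  rfl
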